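-- pv_equiv track=rewrite | github.com/DavidBSTRN/CRC_app | crc_functions.py | find_gen_poly
-- ===== SOURCE A (Python) =====
-- def mod_2(num, div):
--     """Remainder after modulo_2 for binar nums"""
--     # change to list for better iteration
--     num = list(num)
--     div = list(div)
--
--     # till i can divide -> mod2
--     while len(num) >= len(div):
--         # XOR
--         for i in range(0, len(div)):
--             num[i] = str(int(num[i]) ^ int(div[i]))
--
--         # delete '0' at start
--         while len(num) >= len(div) and num[0] == "0":
--             num.pop(0)
--
--     # make remainder as str
--     remainder = "".join(num)
--
--     return remainder
--
-- def all_poly(degree):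
--     """Generate all pol. of certain degree"""
--     all_poly = []
--
--     for i in range(2**(degree)):
--         # create all options of pol. with '1' at start
--         poly = "1" + bin(i)[2:].zfill(degree)
--         all_poly.append(poly)
--
--     return all_poly
--
-- def find_gen_poly(n, k):
--     """Find gen.poly for 'n,k' code"""
--     # create pol. z^n - 1 as bin
--     n_poly = "1" + "0"*(n-1) + "1"
--     all_polynomials = all_poly(n-k)
--
--     gen_poly = []
--     # fromm all pol. of certain degree check remainder of z^n - 1 mod2 pol
--     for i in all_polynomials:
--         remainder = mod_2(n_poly, i)
--
--         if int(remainder) == 0: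
--             gen_poly.append(i)
--
--     return gen_poly
-- ===== SOURCE B (Python) =====
-- def find_gen_poly(n, k):
--     """Find gen.poly for 'n,k' code: degree n-k binary polynomials g with
--     g | x^n - 1 over GF(2), found by computing x^n mod g by square-and-multiply."""
--     d = n - k
--     top = 1 << d
--
--     def red(v, g):
--         # reduce v (v < 2*top) modulo g (deg d)
--         return v ^ g if v >= top else v
--
--     def mulmod(a, b, g):
--         # carry-less multiply mod g; a, b < top
--         p = 0
--         while b:
--             if b & 1:
--                 p ^= a
--             a = red(a << 1, g)
--             b >>= 1
--         return p
--
--     res = []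
--     for i in range(top):
--         g = top | i
--         r, b, e = red(1, g), red(2, g), n
--         while e > 0:
--             if e & 1:
--                 r = mulmod(r, b, g)
--             b = mulmod(b, b, g)
--             e >>= 1
--         if r == 1:
--             res.append(format(g, "b"))
--     return res
-- ===== Notes on version B (the rewrite author's own statement) =====
-- stated objective: faster
-- what changed: A long-divides the dividend string "1"+"0"*(n-1)+"1" by every candidate with character-list XOR passes; B never builds the dividend and instead computes x^n mod g for each candidate by square-and-multiply on machine integers (carry-less multiply with per-step reduction), accepting g iff x^n mod g = 1.
-- intended difference: On n <= 0 with k < n, A's dividend string degenerates to "11" = x+1 (negative string repetition) so A returns the degree-(n-k) divisors of x+1, while B's exponent loop runs zero times (x^n mod g = 1) and it returns every degree-(n-k) polynomial, the divisors of x^0 - 1 = 0; no code with n <= 0 exists and B's uniform answer is the intended reading, not an accident of string arithmetic. — e.g. on find_gen_poly(0, -1): A returns ["11"], B returns ["10", "11"]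
import Mathlib
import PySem

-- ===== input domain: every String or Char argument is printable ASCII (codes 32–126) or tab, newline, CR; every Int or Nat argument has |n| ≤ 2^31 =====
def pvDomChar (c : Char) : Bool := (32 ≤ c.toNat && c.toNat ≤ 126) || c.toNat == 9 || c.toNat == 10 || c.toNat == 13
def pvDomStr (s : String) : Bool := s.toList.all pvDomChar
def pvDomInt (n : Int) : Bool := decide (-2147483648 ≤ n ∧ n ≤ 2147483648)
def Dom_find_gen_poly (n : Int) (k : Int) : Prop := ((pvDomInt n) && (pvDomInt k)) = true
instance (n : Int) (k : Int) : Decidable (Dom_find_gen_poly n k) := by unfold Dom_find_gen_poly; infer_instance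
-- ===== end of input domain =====

-- B replaces A's per-candidate long division of the dividend string "1"+"0"*(n-1)+"1" by a
-- square-and-multiply computation of x^n mod g over GF(2) on machine integers (different algorithm:
-- O(log n) register operations instead of O(n) string-list passes per candidate).

-- ===== PORT A =====
/-- `str(int(num[i]) ^ int(div[i]))` — exact for the '0'/'1' characters that occur in `mod_2`. -/
def pvCharXor (c d : Char) : Char := if (c == '1') != (d == '1') then '1' else '0'

/-- the inner `while len(num) >= len(div) and num[0] == "0": num.pop(0)` loop of `mod_2` -/
def pvStrip (L : Nat) : List Char → List Char
  | [] => []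
  | c :: rest => if L ≤ rest.length + 1 ∧ c = '0' then pvStrip L rest else c :: rest

/-- the outer `while len(num) >= len(div)` loop of `mod_2`: XOR `div` into the first `len(div)`
characters, then strip leading zeros.  Fuel: on the inputs that occur (num and div start with '1')
every iteration shortens `num`, so `num.length + 1` steps always suffice. -/
def pvMod2Go (dv : List Char) : Nat → List Char → List Char
  | 0, num => num
  | fuel+1, num =>
      if dv.length ≤ num.length then
        pvMod2Go dv fuel (pvStrip dv.length (List.zipWith pvCharXor num dv ++ num.drop dv.length))
      else num

def mod_2 (num div : String) : String :=
  String.ofList (pvMod2Go div.toList (num.toList.length + 1) num.toList)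

/-- `all_poly`: `"1" + bin(i)[2:].zfill(degree)` for `i in range(2**degree)`.
`2**degree` is ported as `2 ^ degree.toNat` (Python raises TypeError for `degree < 0`, outside `Pre_`). -/
def all_poly (degree : Int) : List String :=
  (PySem.List.pyRange 0 (2 ^ degree.toNat) 1).foldl
    (fun acc i =>
      acc ++ [String.ofList
        ('1' :: PySem.Chars.zfill (PySem.List.slice (PySem.Int.toBinChars0b i) (some 2) none) degree)])
    []

/-- `int(remainder)` ported by hand as the decimal value of the digits — exact for the nonempty
'0'/'1' strings `mod_2` produces here (on any other string Python would raise, which never happens). -/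
def pvDigitsVal (cs : List Char) : Int := cs.foldl (fun a c => 10 * a + ((c.toNat : Int) - 48)) 0

def find_gen_poly (n : Int) (k : Int) : List String :=
  let n_poly : String := String.ofList ('1' :: (List.replicate (n - 1).toNat '0' ++ ['1']))
  let all_polynomials := all_poly (n - k)
  all_polynomials.foldl
    (fun gen_poly i =>
      if pvDigitsVal (mod_2 n_poly i).toList = 0 then gen_poly ++ [i] else gen_poly)
    []

-- ===== PORT B =====
/-- `red(v, g)`: reduce `v < 2*top` modulo `g` (`top = 1 << deg g`). -/
def pvRed (g top v : Nat) : Nat := if top ≤ v then v ^^^ g else v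

/-- the `while b:` loop of `mulmod(a, b, g)`; `b` is halved each iteration, so fuel `b` suffices. -/
def pvMulmodGo (g top : Nat) : Nat → Nat → Nat → Nat → Nat
  | 0, p, _, _ => p
  | fuel+1, p, a, b =>
      if b = 0 then p
      else pvMulmodGo g top fuel (if b % 2 = 1 then p ^^^ a else p) (pvRed g top (a <<< 1)) (b / 2)

/-- `mulmod(a, b, g)`: carry-less multiply with per-step reduction, accumulator `p = 0`. -/
def pvMulmod (g top p a b : Nat) : Nat := pvMulmodGo g top b p a b

/-- the `while e > 0` square-and-multiply loop; `e >>= 1` halves `e`, so fuel `e` suffices. -/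
def pvPowLoopGo (g top : Nat) : Nat → Nat → Nat → Nat → Nat
  | 0, r, _, _ => r
  | fuel+1, r, b, e =>
      if e = 0 then r
      else pvPowLoopGo g top fuel (if e % 2 = 1 then pvMulmod g top 0 r b else r)
        (pvMulmod g top 0 b b) (e / 2)

def pvPowLoop (g top r b e : Nat) : Nat := pvPowLoopGo g top e r b e

def find_gen_poly_alt (n : Int) (k : Int) : List String :=
  let d := n - k
  let top : Nat := 2 ^ d.toNat       -- 1 << d; Python raises ValueError for d < 0 (outside Pre_)
  (PySem.List.pyRange 0 (top : Int) 1).foldl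
    (fun res i =>
      let g : Nat := top ||| i.toNat                                   -- top | i  (0 ≤ i < top)
      let r := pvPowLoop g top (pvRed g top 1) (pvRed g top 2) n.toNat -- while e > 0 … on e = n
      if r = 1 then res ++ [String.ofList (PySem.Int.toBinChars (g : Int))] else res)
    []

-- ===== PRECONDITION & SPEC =====
-- Pre_ excludes exactly k > n, where A raises TypeError (range(2**(n-k)) with a negative exponent);
-- B raises ValueError there too (1 << (n-k) with n-k < 0).
def Pre_find_gen_poly (n : Int) (k : Int) : Prop := k ≤ n
instance (n : Int) (k : Int) : Decidable (Pre_find_gen_poly n k) := by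
  unfold Pre_find_gen_poly; infer_instance
def pvWitness_find_gen_poly : Int × Int := (3, 1)

-- On n ≤ 0 with k < n, A's dividend string "1"+"0"*(n-1)+"1" degenerates to "11" = x+1 and A returns
-- the degree-(n-k) divisors of x+1, while B (whose exponent loop runs zero times, so x^n mod g = 1)
-- returns every degree-(n-k) polynomial, i.e. the divisors of x^0 - 1 = 0; no (n,k) code with n ≤ 0
-- exists, and B's uniform answer is the intended reading of the degenerate case, not an accident of
-- Python's negative string repetition.
def D_find_gen_poly (n : Int) (k : Int) : Prop := n ≤ 0 ∧ k < n
instance (n : Int) (k : Int) : Decidable (D_find_gen_poly n k) := by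
  unfold D_find_gen_poly; infer_instance

def Spec_find_gen_poly (n : Int) (k : Int) (out : List String) : Prop :=
  ¬ D_find_gen_poly n k → out = find_gen_poly_alt n k
instance (n : Int) (k : Int) (out : List String) : Decidable (Spec_find_gen_poly n k out) := by
  unfold Spec_find_gen_poly; infer_instance

def pvDiffWitness_find_gen_poly : Int × Int := (0, -1)
def pvDiffWitnessOut_find_gen_poly : (List String) × (List String) := (["11"], ["10", "11"])

-- ===== CLAIM (what is proved, stated in full; the proofs are below) =====
def Claim_unchanged_find_gen_poly : Prop := ∀ (n : Int) (k : Int), Dom_find_gen_poly n k → Pre_find_gen_poly n k → Spec_find_gen_poly n k (find_gen_poly n k)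
def Claim_changed_find_gen_poly : Prop := Dom_find_gen_poly (pvDiffWitness_find_gen_poly.1) (pvDiffWitness_find_gen_poly.2) ∧ Pre_find_gen_poly (pvDiffWitness_find_gen_poly.1) (pvDiffWitness_find_gen_poly.2) ∧ D_find_gen_poly (pvDiffWitness_find_gen_poly.1) (pvDiffWitness_find_gen_poly.2) ∧ find_gen_poly (pvDiffWitness_find_gen_poly.1) (pvDiffWitness_find_gen_poly.2) = pvDiffWitnessOut_find_gen_poly.1 ∧ find_gen_poly_alt (pvDiffWitness_find_gen_poly.1) (pvDiffWitness_find_gen_poly.2) = pvDiffWitnessOut_find_gen_poly.2 ∧ pvDiffWitnessOut_find_gen_poly.1 ≠ pvDiffWitnessOut_find_gen_poly.2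
def Claim_exact_find_gen_poly : Prop := ∀ (n : Int) (k : Int), Dom_find_gen_poly n k → Pre_find_gen_poly n k → D_find_gen_poly n k → find_gen_poly n k ≠ find_gen_poly_alt n k

-- ===== LEMMAS AND PROOFS =====

-- ---------- generic xor facts ----------
theorem pvXorMod2 (x y : Nat) : (x ^^^ y) % 2 = (x % 2) ^^^ (y % 2) := by
  have h := Nat.testBit_xor x y 0
  rw [Nat.testBit_zero, Nat.testBit_zero, Nat.testBit_zero] at h
  rcases Nat.mod_two_eq_zero_or_one x with hx | hx <;>
    rcases Nat.mod_two_eq_zero_or_one y with hy | hy <;>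
      simp [hx, hy] at h ⊢ <;> omega

theorem pvXorDiv2 (x y : Nat) : (x ^^^ y) / 2 = (x / 2) ^^^ (y / 2) := by
  apply Nat.eq_of_testBit_eq
  intro i
  have h1 : ((x ^^^ y) / 2).testBit i = (x ^^^ y).testBit (i + 1) := (Nat.testBit_succ _ _).symm
  rw [h1, Nat.testBit_xor, Nat.testBit_xor, Nat.testBit_succ, Nat.testBit_succ]

theorem pvXorEq (x y : Nat) : x ^^^ y = 2 * ((x / 2) ^^^ (y / 2)) + ((x % 2) ^^^ (y % 2)) := by
  have h1 := pvXorDiv2 x y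
  have h2 := pvXorMod2 x y
  omega

theorem pvXorTwoMulAdd (x y r : Nat) (hr : r < 2) : (2 * x + r) ^^^ 2 * y = 2 * (x ^^^ y) + r := by
  rw [pvXorEq (2 * x + r) (2 * y)]
  have h1 : (2 * x + r) / 2 = x := by omega
  have h2 : (2 * x + r) % 2 = r := by omega
  have h3 : (2 * y) / 2 = y := by omega
  have h4 : (2 * y) % 2 = 0 := by omega
  rw [h1, h2, h3, h4, Nat.xor_zero]

theorem pvTwoMulXor (x y : Nat) : 2 * (x ^^^ y) = 2 * x ^^^ 2 * y := by
  have h := pvXorTwoMulAdd x y 0 (by omega)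
  simpa using h.symm

theorem pvMulPowXor (x y t : Nat) : (x ^^^ y) * 2 ^ t = x * 2 ^ t ^^^ y * 2 ^ t := by
  induction t with
  | zero => simp
  | succ t ih =>
      have e : ∀ z : Nat, z * 2 ^ (t+1) = 2 * (z * 2 ^ t) := by intro z; ring
      rw [e, e, e, ih, pvTwoMulXor]

theorem pvDisjXor (a b t : Nat) (hb : b < 2 ^ t) : a * 2 ^ t ^^^ b = a * 2 ^ t + b := by
  induction t generalizing a b with
  | zero =>
      have : b = 0 := by simpa using hb
      subst this; simp
  | succ t ih =>
      have e : a * 2 ^ (t+1) = 2 * (a * 2 ^ t) := by ring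
      have hb2 : b / 2 < 2 ^ t := by
        have : (2:Nat) ^ (t+1) = 2 * 2 ^ t := by ring
        omega
      calc a * 2 ^ (t+1) ^^^ b
          = (2 * (b / 2) + b % 2) ^^^ 2 * (a * 2 ^ t) := by
            rw [Nat.xor_comm, e]; congr 1; omega
        _ = 2 * ((b / 2) ^^^ a * 2 ^ t) + b % 2 := pvXorTwoMulAdd _ _ _ (by omega)
        _ = 2 * (a * 2 ^ t ^^^ (b / 2)) + b % 2 := by rw [Nat.xor_comm (b / 2)]
        _ = 2 * (a * 2 ^ t + b / 2) + b % 2 := by rw [ih _ _ hb2]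
        _ = a * 2 ^ (t+1) + b := by rw [e]; omega

theorem pvXorGe {x y t : Nat} (hy : y < 2 ^ t) (hx : 2 ^ t ≤ x) : 2 ^ t ≤ x ^^^ y := by
  by_contra h
  push_neg at h
  have hxx : x = (x ^^^ y) ^^^ y := by rw [Nat.xor_assoc, Nat.xor_self, Nat.xor_zero]
  have : x < 2 ^ t := by rw [hxx]; exact Nat.xor_lt_two_pow h hy
  omega

theorem pvTopOf {x t : Nat} (h1 : 2 ^ t ≤ x) (h2 : x < 2 ^ (t+1)) : x.testBit t = true := by
  induction t generalizing x with
  | zero =>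
      have : x = 1 := by simp at h1 h2; omega
      subst this; decide
  | succ t ih =>
      rw [Nat.testBit_succ]
      apply ih
      · have h3 : (2:Nat) ^ (t+1) = 2 * 2 ^ t := by ring
        omega
      · have h3 : (2:Nat) ^ (t+2) = 2 * 2 ^ (t+1) := by ring
        omega

theorem pvTopCancel {x y t : Nat} (hx1 : 2 ^ t ≤ x) (hx2 : x < 2 ^ (t+1))
    (hy1 : 2 ^ t ≤ y) (hy2 : y < 2 ^ (t+1)) : x ^^^ y < 2 ^ t := by
  by_contra h
  push_neg at h
  have hlt : x ^^^ y < 2 ^ (t+1) := Nat.xor_lt_two_pow hx2 hy2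
  have htb : (x ^^^ y).testBit t = true := pvTopOf h hlt
  rw [Nat.testBit_xor, pvTopOf hx1 hx2, pvTopOf hy1 hy2] at htb
  simp at htb

theorem pvOrAdd {T j : Nat} (hj : j < 2 ^ T) : 2 ^ T ||| j = 2 ^ T + j := by
  have hxor : 2 ^ T ^^^ j = 2 ^ T + j := by
    have h := pvDisjXor 1 j T hj
    simpa using h
  rw [← hxor]
  apply Nat.eq_of_testBit_eq
  intro i
  rw [Nat.testBit_or, Nat.testBit_xor, Nat.testBit_two_pow]
  by_cases h : T = i
  · subst h
    have : j.testBit T = false := Nat.testBit_lt_two_pow hj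
    simp [this]
  · simp [h]

-- ---------- carry-less multiplication ----------
def pvCl (a b : Nat) : Nat :=
  if a = 0 then 0 else (if a % 2 = 1 then b else 0) ^^^ 2 * pvCl (a / 2) b
termination_by a
decreasing_by exact Nat.div_lt_self (Nat.pos_of_ne_zero (by assumption)) (by norm_num)

theorem pvCl_zero_left (b : Nat) : pvCl 0 b = 0 := by rw [pvCl]; simp

theorem pvCl_eq {a : Nat} (ha : a ≠ 0) (b : Nat) :
    pvCl a b = (if a % 2 = 1 then b else 0) ^^^ 2 * pvCl (a / 2) b := by
  rw [pvCl]; simp [ha]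

theorem pvCl_one_left (b : Nat) : pvCl 1 b = b := by
  rw [pvCl_eq (by omega) b]; norm_num [pvCl_zero_left]

theorem pvCl_two_mul_left (a b : Nat) : pvCl (2 * a) b = 2 * pvCl a b := by
  rcases Nat.eq_zero_or_pos a with rfl | ha
  · simp [pvCl_zero_left]
  · rw [pvCl_eq (by omega) b]
    have h2 : ¬ ((2 * a) % 2 = 1) := by omega
    have h3 : 2 * a / 2 = a := by omega
    simp [h2, h3]

theorem pvCl_odd_left (a b : Nat) : pvCl (2 * a + 1) b = b ^^^ 2 * pvCl a b := by
  rw [pvCl_eq (by omega) b]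
  have h2 : (2 * a + 1) % 2 = 1 := by omega
  have h3 : (2 * a + 1) / 2 = a := by omega
  simp [h2, h3]

theorem pvCl_zero_right (a : Nat) : pvCl a 0 = 0 := by
  induction a using Nat.strong_induction_on with
  | _ a ih =>
      rcases Nat.eq_zero_or_pos a with rfl | ha
      · exact pvCl_zero_left 0
      · rw [pvCl_eq (by omega) 0]
        have hlt : a / 2 < a := Nat.div_lt_self ha (by norm_num)
        simp [ih _ hlt]

theorem pvCl_one_right (a : Nat) : pvCl a 1 = a := by
  induction a using Nat.strong_induction_on with
  | _ a ih =>
      rcases Nat.eq_zero_or_pos a with rfl | ha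
      · simp [pvCl_zero_left]
      · have hlt : a / 2 < a := Nat.div_lt_self ha (by norm_num)
        rw [pvCl_eq (by omega) 1, ih _ hlt]
        by_cases hp : a % 2 = 1
        · rw [if_pos hp]
          have h : (1:Nat) ^^^ 2 * (a / 2) = 2 * (a / 2) + 1 := by
            have := pvXorTwoMulAdd 0 (a / 2) 1 (by omega)
            simpa using this
          rw [h]; omega
        · rw [if_neg hp, Nat.zero_xor]; omega

theorem pvCl_right_distrib (a x y : Nat) : pvCl a (x ^^^ y) = pvCl a x ^^^ pvCl a y := by
  induction a using Nat.strong_induction_on with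
  | _ a ih =>
      rcases Nat.eq_zero_or_pos a with rfl | ha
      · simp [pvCl_zero_left]
      · have hlt : a / 2 < a := Nat.div_lt_self ha (by norm_num)
        rw [pvCl_eq (by omega) (x ^^^ y), pvCl_eq (by omega) x, pvCl_eq (by omega) y,
          ih _ hlt, pvTwoMulXor]
        by_cases hp : a % 2 = 1 <;>
          simp [hp, Nat.xor_assoc, Nat.xor_left_comm, Nat.xor_comm]

theorem pvCl_two_mul_right (a b : Nat) : pvCl a (2 * b) = 2 * pvCl a b := by
  induction a using Nat.strong_induction_on with
  | _ a ih =>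
      rcases Nat.eq_zero_or_pos a with rfl | ha
      · simp [pvCl_zero_left]
      · have hlt : a / 2 < a := Nat.div_lt_self ha (by norm_num)
        rw [pvCl_eq (by omega) (2 * b), pvCl_eq (by omega) b, ih _ hlt, pvTwoMulXor]
        by_cases hp : a % 2 = 1 <;> simp [hp]

theorem pvCl_comm (a b : Nat) : pvCl a b = pvCl b a := by
  induction a using Nat.strong_induction_on generalizing b with
  | _ a ih =>
      rcases Nat.eq_zero_or_pos a with rfl | ha
      · rw [pvCl_zero_left, pvCl_zero_right]
      · have hlt : a / 2 < a := Nat.div_lt_self ha (by norm_num)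
        have hdec : (a % 2) ^^^ 2 * (a / 2) = a := by
          have h := pvXorTwoMulAdd 0 (a / 2) (a % 2) (by omega)
          simp at h
          omega
        conv_rhs => rw [← hdec]
        rw [pvCl_right_distrib, pvCl_two_mul_right, ← ih _ hlt, pvCl_eq (by omega) b]
        by_cases hp : a % 2 = 1
        · rw [if_pos hp, hp, pvCl_one_right]
        · have hp0 : a % 2 = 0 := by omega
          rw [if_neg hp, hp0, pvCl_zero_right]

theorem pvCl_left_distrib (x y b : Nat) : pvCl (x ^^^ y) b = pvCl x b ^^^ pvCl y b := by
  rw [pvCl_comm (x ^^^ y) b, pvCl_right_distrib, pvCl_comm b x, pvCl_comm b y]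

theorem pvCl_assoc (a b c : Nat) : pvCl (pvCl a b) c = pvCl a (pvCl b c) := by
  induction a using Nat.strong_induction_on generalizing b c with
  | _ a ih =>
      rcases Nat.eq_zero_or_pos a with rfl | ha
      · simp [pvCl_zero_left]
      · have hlt : a / 2 < a := Nat.div_lt_self ha (by norm_num)
        rw [pvCl_eq (by omega) b, pvCl_eq (by omega) (pvCl b c),
          pvCl_left_distrib, pvCl_two_mul_left, ih _ hlt]
        by_cases hp : a % 2 = 1
        · rw [if_pos hp, if_pos hp]
        · rw [if_neg hp, if_neg hp, pvCl_zero_left]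

theorem pvCl_pow2_left (m g : Nat) : pvCl (2 ^ m) g = 2 ^ m * g := by
  induction m with
  | zero => simp [pvCl_one_left]
  | succ m ih =>
      have h : (2:Nat) ^ (m+1) = 2 * 2 ^ m := by ring
      rw [h, pvCl_two_mul_left, ih]; ring

theorem pvCl_ge {g q d : Nat} (hg1 : 2 ^ d ≤ g) (hg2 : g < 2 ^ (d+1)) (hq : q ≠ 0) :
    2 ^ d ≤ pvCl q g := by
  induction q using Nat.strong_induction_on with
  | _ q ih =>
      rcases Nat.even_or_odd q with he | ho
      · obtain ⟨m, hm⟩ := he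
        have hm2 : q = 2 * m := by omega
        subst hm2
        have hmne : m ≠ 0 := by omega
        rw [pvCl_two_mul_left]
        have := ih m (by omega) hmne
        omega
      · obtain ⟨m, hm⟩ := ho
        subst hm
        rw [pvCl_odd_left]
        rcases Nat.eq_zero_or_pos m with rfl | hmpos
        · simpa [pvCl_zero_left] using hg1
        · have h1 : 2 ^ d ≤ pvCl m g := ih m (by omega) (by omega)
          have h2 : 2 ^ (d+1) ≤ 2 * pvCl m g := by
            have : (2:Nat) ^ (d+1) = 2 * 2 ^ d := by ring
            omega
          have h3 := pvXorGe (t := d+1) (x := 2 * pvCl m g) (y := g) hg2 h2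
          have h4 : (2:Nat) ^ d ≤ 2 ^ (d+1) := Nat.pow_le_pow_right (by norm_num) (by omega)
          rw [Nat.xor_comm] at h3
          omega

-- ---------- congruence modulo g ----------
def pvCong (g a b : Nat) : Prop := ∃ q, b = a ^^^ pvCl q g

theorem pvCong_refl (g a : Nat) : pvCong g a a := ⟨0, by simp [pvCl_zero_left]⟩

theorem pvCong_symm {g a b : Nat} (h : pvCong g a b) : pvCong g b a := by
  obtain ⟨q, rfl⟩ := h
  exact ⟨q, by rw [Nat.xor_assoc, Nat.xor_self, Nat.xor_zero]⟩

theorem pvCong_trans {g a b c : Nat} (h1 : pvCong g a b) (h2 : pvCong g b c) : pvCong g a c := by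
  obtain ⟨q1, rfl⟩ := h1
  obtain ⟨q2, rfl⟩ := h2
  exact ⟨q1 ^^^ q2, by rw [pvCl_left_distrib, Nat.xor_assoc]⟩

theorem pvCong_xor_left {g a b : Nat} (x : Nat) (h : pvCong g a b) :
    pvCong g (x ^^^ a) (x ^^^ b) := by
  obtain ⟨q, rfl⟩ := h
  exact ⟨q, by rw [Nat.xor_assoc]⟩

theorem pvCong_xor_iff {g a b : Nat} (x : Nat) : pvCong g (a ^^^ x) (b ^^^ x) ↔ pvCong g a b := by
  constructor
  · rintro ⟨q, hq⟩
    refine ⟨q, ?_⟩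
    have h2 : (b ^^^ x) ^^^ x = ((a ^^^ x) ^^^ pvCl q g) ^^^ x := by rw [hq]
    simpa [Nat.xor_assoc, Nat.xor_left_comm, Nat.xor_comm] using h2
  · rintro ⟨q, rfl⟩
    exact ⟨q, by simp [Nat.xor_assoc, Nat.xor_left_comm, Nat.xor_comm]⟩

theorem pvCong_self_xor_g (g a : Nat) : pvCong g a (a ^^^ g) :=
  ⟨1, by rw [pvCl_one_left]⟩

theorem pvCong_mul_left {g a b : Nat} (c : Nat) (h : pvCong g a b) :
    pvCong g (pvCl c a) (pvCl c b) := by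
  obtain ⟨q, rfl⟩ := h
  refine ⟨pvCl c q, ?_⟩
  rw [pvCl_right_distrib]
  congr 1
  rw [pvCl_assoc]

theorem pvCong_mul_right {g a b : Nat} (c : Nat) (h : pvCong g a b) :
    pvCong g (pvCl a c) (pvCl b c) := by
  rw [pvCl_comm a c, pvCl_comm b c]; exact pvCong_mul_left c h

theorem pvCong_unique {g d a b : Nat} (hg1 : 2 ^ d ≤ g) (hg2 : g < 2 ^ (d+1))
    (ha : a < 2 ^ d) (hb : b < 2 ^ d) (h : pvCong g a b) : a = b := by
  obtain ⟨q, hq⟩ := h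
  rcases Nat.eq_zero_or_pos q with rfl | hqpos
  · have := hq
    simp [pvCl_zero_left] at this
    exact this.symm
  · exfalso
    have hcl : pvCl q g = a ^^^ b := by
      rw [hq, ← Nat.xor_assoc, Nat.xor_self, Nat.zero_xor]
    have h1 : 2 ^ d ≤ pvCl q g := pvCl_ge hg1 hg2 (by omega)
    have h2 : a ^^^ b < 2 ^ d := Nat.xor_lt_two_pow ha hb
    omega

-- carry-less powers (proof-side spec of the square-and-multiply loop)
def pvClpow (b : Nat) : Nat → Nat
  | 0 => 1
  | e + 1 => pvCl b (pvClpow b e)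

theorem pvClpow_add (b m n : Nat) : pvClpow b (m + n) = pvCl (pvClpow b m) (pvClpow b n) := by
  induction m with
  | zero => simp [pvClpow, pvCl_one_left]
  | succ m ih =>
      have h : m + 1 + n = (m + n) + 1 := by ring
      rw [h]
      show pvCl b (pvClpow b (m + n)) = pvCl (pvCl b (pvClpow b m)) (pvClpow b n)
      rw [ih, pvCl_assoc]

theorem pvClpow_two_mul (b m : Nat) : pvClpow b (2 * m) = pvClpow (pvCl b b) m := by
  induction m with
  | zero => simp [pvClpow]
  | succ m ih =>
      have h : 2 * (m + 1) = 2 * m + 2 := by ring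
      rw [h, pvClpow_add, ih]
      show pvCl (pvClpow (pvCl b b) m) (pvClpow b 2) = pvCl (pvCl b b) (pvClpow (pvCl b b) m)
      have h2 : pvClpow b 2 = pvCl b b := by
        show pvCl b (pvCl b (pvClpow b 0)) = pvCl b b
        rw [show pvClpow b 0 = 1 from rfl, pvCl_one_right]
      rw [h2, pvCl_comm]

theorem pvClpow_two (e : Nat) : pvClpow 2 e = 2 ^ e := by
  induction e with
  | zero => simp [pvClpow]
  | succ e ih =>
      show pvCl 2 (pvClpow 2 e) = 2 ^ (e+1)
      rw [ih, show (2:Nat) = 2 * 1 by ring]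
      rw [pvCl_two_mul_left, pvCl_one_left]
      ring

theorem pvCong_clpow {g b b' : Nat} (e : Nat) (h : pvCong g b b') :
    pvCong g (pvClpow b e) (pvClpow b' e) := by
  induction e with
  | zero => exact pvCong_refl _ _
  | succ e ih =>
      show pvCong g (pvCl b (pvClpow b e)) (pvCl b' (pvClpow b' e))
      exact pvCong_trans (pvCong_mul_left _ ih) (pvCong_mul_right _ h)

-- ---------- correctness of the B-side loops ----------
theorem pvRed_spec {g d : Nat} (hg1 : 2 ^ d ≤ g) (hg2 : g < 2 ^ (d+1))
    {v : Nat} (hv : v < 2 ^ (d+1)) :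
    pvRed g (2 ^ d) v < 2 ^ d ∧ pvCong g v (pvRed g (2 ^ d) v) := by
  unfold pvRed
  by_cases h : 2 ^ d ≤ v
  · simp only [h, if_true]
    exact ⟨pvTopCancel h hv hg1 hg2, pvCong_self_xor_g g v⟩
  · simp only [h, if_false]
    exact ⟨by omega, pvCong_refl g v⟩

theorem pvMulmodGo_spec {g d : Nat} (hg1 : 2 ^ d ≤ g) (hg2 : g < 2 ^ (d+1)) :
    ∀ fuel b p a, b ≤ fuel → p < 2 ^ d → a < 2 ^ d →
      pvMulmodGo g (2 ^ d) fuel p a b < 2 ^ d ∧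
      pvCong g (p ^^^ pvCl b a) (pvMulmodGo g (2 ^ d) fuel p a b) := by
  intro fuel
  induction fuel with
  | zero =>
      intro b p a hb hp _
      have : b = 0 := by omega
      subst this
      simp only [pvMulmodGo]
      exact ⟨hp, by rw [pvCl_zero_left, Nat.xor_zero]; exact pvCong_refl _ _⟩
  | succ fuel ih =>
      intro b p a hb hp ha
      by_cases hb0 : b = 0
      · subst hb0
        simp only [pvMulmodGo, if_pos rfl]
        exact ⟨hp, by rw [pvCl_zero_left, Nat.xor_zero]; exact pvCong_refl _ _⟩
      · simp only [pvMulmodGo, if_neg hb0]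
        have hshift : a <<< 1 = 2 * a := by rw [Nat.shiftLeft_eq]; ring
        have h2a : 2 * a < 2 ^ (d+1) := by
          have : (2:Nat) ^ (d+1) = 2 * 2 ^ d := by ring
          omega
        rw [hshift]
        have hred := pvRed_spec hg1 hg2 (v := 2 * a) h2a
        have hp'lt : (if b % 2 = 1 then p ^^^ a else p) < 2 ^ d := by
          split
          · exact Nat.xor_lt_two_pow hp ha
          · exact hp
        have hmain := ih (b / 2) (if b % 2 = 1 then p ^^^ a else p)
          (pvRed g (2 ^ d) (2 * a)) (by omega) hp'lt hred.1
        refine ⟨hmain.1, pvCong_trans ?_ hmain.2⟩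
        have hdecomp : pvCl b a = (if b % 2 = 1 then a else 0) ^^^ pvCl (b / 2) (2 * a) := by
          rw [pvCl_two_mul_right]
          rcases Nat.mod_two_eq_zero_or_one b with hpar | hpar
          · have hb2 : b = 2 * (b / 2) := by omega
            conv_lhs => rw [hb2]
            rw [pvCl_two_mul_left]
            simp [hpar]
          · have hb2 : b = 2 * (b / 2) + 1 := by omega
            conv_lhs => rw [hb2]
            rw [pvCl_odd_left]
            simp [hpar]
        have hstep : p ^^^ pvCl b a
            = (if b % 2 = 1 then p ^^^ a else p) ^^^ pvCl (b / 2) (2 * a) := by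
          rw [hdecomp]
          rcases Nat.mod_two_eq_zero_or_one b with hpar | hpar <;>
            simp [hpar, Nat.xor_assoc]
        rw [hstep]
        exact pvCong_xor_left _ (pvCong_mul_left _ hred.2)

theorem pvMulmod_spec {g d : Nat} (hg1 : 2 ^ d ≤ g) (hg2 : g < 2 ^ (d+1))
    (b p a : Nat) (hp : p < 2 ^ d) (ha : a < 2 ^ d) :
    pvMulmod g (2 ^ d) p a b < 2 ^ d ∧
    pvCong g (p ^^^ pvCl b a) (pvMulmod g (2 ^ d) p a b) :=
  pvMulmodGo_spec hg1 hg2 b b p a le_rfl hp ha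

theorem pvPowLoopGo_spec {g d : Nat} (hg1 : 2 ^ d ≤ g) (hg2 : g < 2 ^ (d+1)) :
    ∀ fuel e r b, e ≤ fuel → r < 2 ^ d → b < 2 ^ d →
      pvPowLoopGo g (2 ^ d) fuel r b e < 2 ^ d ∧
      pvCong g (pvCl r (pvClpow b e)) (pvPowLoopGo g (2 ^ d) fuel r b e) := by
  intro fuel
  induction fuel with
  | zero =>
      intro e r b he hr _
      have : e = 0 := by omega
      subst this
      simp only [pvPowLoopGo]
      exact ⟨hr, by rw [show pvClpow b 0 = 1 from rfl, pvCl_one_right]; exact pvCong_refl _ _⟩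
  | succ fuel ih =>
      intro e r b he hr hb
      by_cases he0 : e = 0
      · subst he0
        simp only [pvPowLoopGo, if_pos rfl]
        exact ⟨hr, by rw [show pvClpow b 0 = 1 from rfl, pvCl_one_right]; exact pvCong_refl _ _⟩
      · simp only [pvPowLoopGo, if_neg he0]
        have hmulr := pvMulmod_spec hg1 hg2 b 0 r (by positivity) hr
        have hmulb := pvMulmod_spec hg1 hg2 b 0 b (by positivity) hb
        have hr'lt : (if e % 2 = 1 then pvMulmod g (2^d) 0 r b else r) < 2 ^ d := by
          split
          · exact hmulr.1
          · exact hr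
        have hmain := ih (e / 2) (if e % 2 = 1 then pvMulmod g (2^d) 0 r b else r)
          (pvMulmod g (2^d) 0 b b) (by omega) hr'lt hmulb.1
        refine ⟨hmain.1, pvCong_trans ?_ hmain.2⟩
        have hb' : pvCong g (pvClpow (pvCl b b) (e / 2))
            (pvClpow (pvMulmod g (2^d) 0 b b) (e / 2)) := by
          apply pvCong_clpow
          have h0 := hmulb.2
          rwa [Nat.zero_xor] at h0
        have hsplit : pvClpow b e = pvCl (pvClpow b (e % 2)) (pvClpow (pvCl b b) (e / 2)) := by
          conv_lhs => rw [show e = e % 2 + 2 * (e / 2) by omega]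
          rw [pvClpow_add, pvClpow_two_mul]
        rcases Nat.mod_two_eq_zero_or_one e with hpar | hpar
        · rw [hsplit, hpar]
          rw [show pvClpow b 0 = 1 from rfl, pvCl_one_left]
          rw [if_neg (by norm_num : ¬ ((0:Nat) = 1))]
          exact pvCong_mul_left _ hb'
        · rw [hsplit, hpar]
          have h1 : pvClpow b 1 = b := by
            show pvCl b (pvClpow b 0) = b
            rw [show pvClpow b 0 = 1 from rfl, pvCl_one_right]
          rw [h1, ← pvCl_assoc]
          rw [if_pos rfl]
          have h3 : pvCong g (pvCl r b) (pvMulmod g (2^d) 0 r b) := by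
            have h0 := hmulr.2
            rw [Nat.zero_xor] at h0
            rw [pvCl_comm r b]
            exact h0
          exact pvCong_trans (pvCong_mul_right _ h3) (pvCong_mul_left _ hb')

theorem pvPowLoop_spec {g d : Nat} (hg1 : 2 ^ d ≤ g) (hg2 : g < 2 ^ (d+1))
    (e r b : Nat) (hr : r < 2 ^ d) (hb : b < 2 ^ d) :
    pvPowLoop g (2 ^ d) r b e < 2 ^ d ∧
    pvCong g (pvCl r (pvClpow b e)) (pvPowLoop g (2 ^ d) r b e) :=
  pvPowLoopGo_spec hg1 hg2 e e r b le_rfl hr hb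

-- the degenerate candidate (k = n, g = 1): the residue register is 0 from the start
theorem pvMulmodGo_zero : ∀ fuel b, pvMulmodGo 1 1 fuel 0 0 b = 0 := by
  intro fuel
  induction fuel with
  | zero => intro b; simp [pvMulmodGo]
  | succ fuel ih =>
      intro b
      by_cases hb : b = 0
      · simp [pvMulmodGo, hb]
      · have hred : pvRed 1 1 (0 <<< 1) = 0 := by simp [pvRed, Nat.shiftLeft_eq]
        simp only [pvMulmodGo, if_neg hb, hred]
        have h0 : (if b % 2 = 1 then 0 ^^^ 0 else 0) = 0 := by split <;> simp
        rw [h0]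
        exact ih (b / 2)

theorem pvPowLoopGo_zero : ∀ fuel b e, pvPowLoopGo 1 1 fuel 0 b e = 0 := by
  intro fuel
  induction fuel with
  | zero => intro b e; simp [pvPowLoopGo]
  | succ fuel ih =>
      intro b e
      by_cases he : e = 0
      · simp [pvPowLoopGo, he]
      · simp only [pvPowLoopGo, if_neg he]
        have h0 : (if e % 2 = 1 then pvMulmod 1 1 0 0 b else 0) = 0 := by
          split
          · exact pvMulmodGo_zero b b
          · rfl
        rw [h0]
        exact ih _ _

-- ---------- bit-string values (the A side) ----------
def pvBit (c : Char) : Nat := if c = '1' then 1 else 0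

def pvVal (cs : List Char) : Nat := cs.foldl (fun a c => 2 * a + pvBit c) 0

def pvChars01 (cs : List Char) : Prop := ∀ c ∈ cs, c = '0' ∨ c = '1'

theorem pvVal_go (cs : List Char) : ∀ acc : Nat,
    List.foldl (fun a c => 2 * a + pvBit c) acc cs = acc * 2 ^ cs.length + pvVal cs := by
  induction cs with
  | nil => intro acc; simp [pvVal]
  | cons c cs ih =>
      intro acc
      show List.foldl _ (2 * acc + pvBit c) cs = _
      rw [ih (2 * acc + pvBit c)]
      have h2 : pvVal (c :: cs) = pvBit c * 2 ^ cs.length + pvVal cs := by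
        show List.foldl _ (2 * 0 + pvBit c) cs = _
        rw [ih (2 * 0 + pvBit c)]
        ring
      rw [h2, List.length_cons]
      ring

theorem pvVal_cons (c : Char) (cs : List Char) :
    pvVal (c :: cs) = pvBit c * 2 ^ cs.length + pvVal cs := by
  show List.foldl _ (2 * 0 + pvBit c) cs = _
  rw [pvVal_go]
  ring

theorem pvVal_append (xs ys : List Char) :
    pvVal (xs ++ ys) = pvVal xs * 2 ^ ys.length + pvVal ys := by
  show List.foldl _ 0 (xs ++ ys) = _
  rw [List.foldl_append, pvVal_go]
  rfl

theorem pvVal_lt (cs : List Char) : pvVal cs < 2 ^ cs.length := by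
  induction cs with
  | nil => simp [pvVal]
  | cons c cs ih =>
      rw [pvVal_cons, List.length_cons]
      have hb : pvBit c ≤ 1 := by unfold pvBit; split <;> omega
      have h2 : (2:Nat) ^ (cs.length + 1) = 2 ^ cs.length + 2 ^ cs.length := by ring
      nlinarith

theorem pvVal_replicate_zero (m : Nat) : pvVal (List.replicate m '0') = 0 := by
  induction m with
  | zero => simp [pvVal]
  | succ m ih =>
      rw [List.replicate_succ, pvVal_cons, ih]
      simp [pvBit]

theorem pvVal_zero_iff {cs : List Char} (h01 : pvChars01 cs) :
    pvVal cs = 0 ↔ ∀ c ∈ cs, c = '0' := by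
  induction cs with
  | nil => simp [pvVal]
  | cons c cs ih =>
      have hc := h01 c (by simp)
      have h01' : pvChars01 cs := fun x hx => h01 x (List.mem_cons_of_mem _ hx)
      rw [pvVal_cons]
      constructor
      · intro h
        have hpow : 0 < 2 ^ cs.length := by positivity
        have hb : pvBit c * 2 ^ cs.length = 0 ∧ pvVal cs = 0 := by omega
        have hc0 : c = '0' := by
          rcases hc with rfl | rfl
          · rfl
          · exfalso
            have hb1 : pvBit '1' = 1 := rfl
            nlinarith [hb.1]
        intro x hx
        rcases List.mem_cons.mp hx with rfl | hx
        · exact hc0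
        · exact ((ih h01').mp hb.2) x hx
      · intro h
        have hc0 : c = '0' := h c (by simp)
        have hcs : pvVal cs = 0 := (ih h01').mpr (fun x hx => h x (List.mem_cons_of_mem _ hx))
        rw [hcs, hc0]
        simp [pvBit]

theorem pvDigitsVal_go {cs : List Char} (h01 : pvChars01 cs) : ∀ acc : Int, 0 ≤ acc →
    (List.foldl (fun a c => 10 * a + ((c.toNat : Int) - 48)) acc cs = 0 ↔
      acc = 0 ∧ ∀ c ∈ cs, c = '0') := by
  induction cs with
  | nil => intro acc _; simp
  | cons c cs ih =>
      intro acc hacc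
      have hc : c = '0' ∨ c = '1' := h01 c (by simp)
      have h01' : pvChars01 cs := fun x hx => h01 x (List.mem_cons_of_mem _ hx)
      have hbit : (0 : Int) ≤ (c.toNat : Int) - 48 ∧ (c.toNat : Int) - 48 ≤ 1 := by
        rcases hc with rfl | rfl <;> constructor <;> decide
      show List.foldl _ (10 * acc + ((c.toNat : Int) - 48)) cs = 0 ↔ _
      rw [ih h01' (10 * acc + ((c.toNat : Int) - 48)) (by omega)]
      constructor
      · rintro ⟨h1, h2⟩
        have hsplit : acc = 0 ∧ (c.toNat : Int) - 48 = 0 := by omega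
        have hc0 : c = '0' := by
          rcases hc with rfl | rfl
          · rfl
          · exfalso
            have : (('1'.toNat : Int) - 48) = 1 := by decide
            omega
        refine ⟨hsplit.1, ?_⟩
        intro x hx
        rcases List.mem_cons.mp hx with rfl | hx
        · exact hc0
        · exact h2 x hx
      · rintro ⟨h1, h2⟩
        have hc0 : c = '0' := h2 c (by simp)
        subst h1
        refine ⟨by rw [hc0]; decide, fun x hx => h2 x (List.mem_cons_of_mem _ hx)⟩

theorem pvDigitsVal_zero_iff {cs : List Char} (h01 : pvChars01 cs) :
    pvDigitsVal cs = 0 ↔ pvVal cs = 0 := by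
  show List.foldl _ 0 cs = 0 ↔ _
  rw [pvDigitsVal_go h01 0 le_rfl, pvVal_zero_iff h01]
  simp

-- ---------- character-level facts about mod_2's loop ----------
theorem pvChars01_zip (xs ys : List Char) : pvChars01 (List.zipWith pvCharXor xs ys) := by
  induction xs generalizing ys with
  | nil => intro c hc; simp at hc
  | cons x xs ih =>
      intro c hc
      cases ys with
      | nil => simp at hc
      | cons y ys =>
          rcases List.mem_cons.mp hc with rfl | hc
          · unfold pvCharXor
            split
            · right; rfl
            · left; rfl
          · exact ih ys c hc

theorem pvStrip_chars01 (L : Nat) : ∀ xs, pvChars01 xs → pvChars01 (pvStrip L xs) := by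
  intro xs
  induction xs with
  | nil => intro h; simpa [pvStrip] using h
  | cons c rest ih =>
      intro h
      simp only [pvStrip]
      split
      · exact ih (fun x hx => h x (List.mem_cons_of_mem _ hx))
      · exact h

theorem pvStrip_val (L : Nat) : ∀ xs, pvVal (pvStrip L xs) = pvVal xs := by
  intro xs
  induction xs with
  | nil => simp [pvStrip]
  | cons c rest ih =>
      simp only [pvStrip]
      split
      · rename_i hcase
        rw [ih, pvVal_cons, hcase.2]
        simp [pvBit]
      · rfl

theorem pvStrip_length_le (L : Nat) : ∀ xs : List Char, (pvStrip L xs).length ≤ xs.length := by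
  intro xs
  induction xs with
  | nil => simp [pvStrip]
  | cons c rest ih =>
      simp only [pvStrip]
      split
      · exact le_trans ih (by simp)
      · simp

theorem pvStrip_length_ge (L : Nat) : ∀ xs : List Char,
    min xs.length (L - 1) ≤ (pvStrip L xs).length := by
  intro xs
  induction xs with
  | nil => simp [pvStrip]
  | cons c rest ih =>
      simp only [pvStrip]
      split
      · rename_i hcase
        have := ih
        simp only [List.length_cons]
        omega
      · simp only [List.length_cons]
        omega

theorem pvStrip_head (L : Nat) (hL : 1 ≤ L) : ∀ xs : List Char, pvChars01 xs →
    L ≤ (pvStrip L xs).length → (pvStrip L xs).head? = some '1' := by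
  intro xs
  induction xs with
  | nil => intro _ h; simp [pvStrip] at h; omega
  | cons c rest ih =>
      intro h01 hlen
      simp only [pvStrip] at hlen ⊢
      split
      · rename_i hcase
        rw [if_pos hcase] at hlen
        exact ih (fun x hx => h01 x (List.mem_cons_of_mem _ hx)) hlen
      · rename_i hcase
        rw [if_neg hcase] at hlen
        simp only [List.length_cons] at hlen
        have hc : c = '0' ∨ c = '1' := h01 c (by simp)
        have hcne : ¬ c = '0' := by
          intro hc0
          exact hcase ⟨by omega, hc0⟩
        rcases hc with hc0 | hc1
        · exact absurd hc0 hcne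
        · simp [hc1]

theorem pvStrip_decrease (L : Nat) (xs : List Char) (hx : xs.head? = some '0')
    (hlen : L ≤ xs.length) : (pvStrip L xs).length < xs.length := by
  cases xs with
  | nil => simp at hx
  | cons c rest =>
      have hc : c = '0' := by simpa using hx
      simp only [pvStrip, List.length_cons] at hlen ⊢
      rw [if_pos ⟨by omega, hc⟩]
      have := pvStrip_length_le L rest
      omega

theorem pvZipXor_val : ∀ (ys xs : List Char), pvChars01 xs → pvChars01 ys →
    ys.length ≤ xs.length →
    pvVal (List.zipWith pvCharXor xs ys ++ xs.drop ys.length)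
      = pvVal xs ^^^ pvVal ys * 2 ^ (xs.length - ys.length) := by
  intro ys
  induction ys with
  | nil =>
      intro xs _ _ _
      simp [pvVal]
  | cons y ys ih =>
      intro xs h01x h01y hlen
      cases xs with
      | nil => simp at hlen
      | cons x xs =>
          have h01x' : pvChars01 xs := fun c hc => h01x c (List.mem_cons_of_mem _ hc)
          have h01y' : pvChars01 ys := fun c hc => h01y c (List.mem_cons_of_mem _ hc)
          have hlen' : ys.length ≤ xs.length := by simpa using hlen
          have hstep : List.zipWith pvCharXor (x :: xs) (y :: ys) ++ (x :: xs).drop (y :: ys).length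
              = pvCharXor x y :: (List.zipWith pvCharXor xs ys ++ xs.drop ys.length) := by
            simp [List.zipWith_cons_cons, List.length_cons, List.drop_succ_cons]
          rw [hstep]
          have hinner : (List.zipWith pvCharXor xs ys ++ xs.drop ys.length).length = xs.length := by
            rw [List.length_append, List.length_zipWith, List.length_drop]
            omega
          rw [pvVal_cons, hinner, ih xs h01x' h01y' hlen']
          rw [pvVal_cons x xs, pvVal_cons y ys]
          have hbitxor : pvBit (pvCharXor x y) = pvBit x ^^^ pvBit y := by
            have hx := h01x x (by simp)
            have hy := h01y y (by simp)
            rcases hx with rfl | rfl <;> rcases hy with rfl | rfl <;> decide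
          rw [hbitxor]
          have hmlen : (x :: xs).length - (y :: ys).length = xs.length - ys.length := by
            simp
          rw [hmlen]
          set X := xs.length with hX
          set m := xs.length - ys.length with hm
          have hmx : X = ys.length + m := by omega
          have hvx : pvVal xs < 2 ^ X := pvVal_lt xs
          have hvy : pvVal ys < 2 ^ ys.length := pvVal_lt ys
          have hw : pvVal ys * 2 ^ m < 2 ^ X := by
            have h1 : pvVal ys * 2 ^ m < 2 ^ ys.length * 2 ^ m :=
              Nat.mul_lt_mul_of_lt_of_le hvy le_rfl (by positivity)
            calc pvVal ys * 2 ^ m < 2 ^ ys.length * 2 ^ m := h1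
              _ = 2 ^ X := by rw [← pow_add, ← hmx]
          have e1 : (pvBit y * 2 ^ ys.length + pvVal ys) * 2 ^ m
              = pvBit y * 2 ^ X + pvVal ys * 2 ^ m := by
            rw [Nat.add_mul, Nat.mul_assoc, ← pow_add, ← hmx]
          rw [e1]
          rw [← pvDisjXor (pvBit x) (pvVal xs) X hvx,
            ← pvDisjXor (pvBit y) (pvVal ys * 2 ^ m) X hw,
            ← pvDisjXor (pvBit x ^^^ pvBit y) (pvVal xs ^^^ pvVal ys * 2 ^ m) X
              (Nat.xor_lt_two_pow hvx hw),
            pvMulPowXor]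
          simp [Nat.xor_assoc, Nat.xor_left_comm, Nat.xor_comm]

theorem pvMod2Go_spec {dv : List Char} (h01 : pvChars01 dv) (hhead : dv.head? = some '1')
    (hL : 2 ≤ dv.length) :
    ∀ fuel num, num.length < fuel → pvChars01 num → num ≠ [] →
      (dv.length ≤ num.length → num.head? = some '1') →
      pvChars01 (pvMod2Go dv fuel num) ∧ pvMod2Go dv fuel num ≠ [] ∧
      (pvMod2Go dv fuel num).length < dv.length ∧
      pvCong (pvVal dv) (pvVal num) (pvVal (pvMod2Go dv fuel num)) := by
  intro fuel
  induction fuel with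
  | zero =>
      intro num hflt
      exact absurd hflt (by omega)
  | succ fuel ih =>
      intro num hflt h01n hne hheadn
      by_cases hcond : dv.length ≤ num.length
      · simp only [pvMod2Go, if_pos hcond]
        obtain ⟨n0, nrest, rfl⟩ : ∃ c r, num = c :: r := by
          cases num with
          | nil => exact absurd rfl hne
          | cons a b => exact ⟨a, b, rfl⟩
        obtain ⟨d0, drest, rfl⟩ : ∃ c r, dv = c :: r := by
          cases dv with
          | nil => simp at hhead
          | cons a b => exact ⟨a, b, rfl⟩
        have hn0 : n0 = '1' := by have := hheadn hcond; simpa using this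
        have hd0 : d0 = '1' := by simpa using hhead
        set y := List.zipWith pvCharXor (n0 :: nrest) (d0 :: drest)
          ++ (n0 :: nrest).drop (d0 :: drest).length with hy
        have hylen : y.length = (n0 :: nrest).length := by
          rw [hy, List.length_append, List.length_zipWith, List.length_drop]
          simp only [List.length_cons] at hcond ⊢
          omega
        have hyval : pvVal y = pvVal (n0 :: nrest)
            ^^^ pvVal (d0 :: drest) * 2 ^ ((n0 :: nrest).length - (d0 :: drest).length) :=
          pvZipXor_val (d0 :: drest) (n0 :: nrest) h01n h01 hcond
        have hy01 : pvChars01 y := by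
          intro c hc
          rcases List.mem_append.mp hc with hc | hc
          · exact pvChars01_zip _ _ c hc
          · exact h01n c (List.drop_subset _ _ hc)
        have hyhead : y.head? = some '0' := by
          rw [hy, hn0, hd0]
          simp [List.zipWith_cons_cons, pvCharXor]
        set s := pvStrip (d0 :: drest).length y with hs
        have hsval : pvVal s = pvVal y := pvStrip_val _ y
        have hs01 : pvChars01 s := pvStrip_chars01 _ y hy01
        have hslt : s.length < (n0 :: nrest).length := by
          rw [← hylen]
          exact pvStrip_decrease _ y hyhead (by omega)
        have hsge : min y.length ((d0 :: drest).length - 1) ≤ s.length :=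
          pvStrip_length_ge _ y
        have hsne : s ≠ [] := by
          have h1 : 1 ≤ s.length := by
            have h2 : (2:Nat) ≤ (d0 :: drest).length := hL
            have h3 : (d0 :: drest).length ≤ y.length := by omega
            omega
          intro hnil
          rw [hnil] at h1
          simp at h1
        have hshead : (d0 :: drest).length ≤ s.length → s.head? = some '1' :=
          fun hls => pvStrip_head _ (by omega) y hy01 hls
        have hrec := ih s (by omega) hs01 hsne hshead
        refine ⟨hrec.1, hrec.2.1, hrec.2.2.1, ?_⟩
        refine pvCong_trans ?_ hrec.2.2.2
        rw [hsval, hyval]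
        exact ⟨2 ^ ((n0 :: nrest).length - (d0 :: drest).length), by
          rw [pvCl_pow2_left, Nat.mul_comm]⟩
      · simp only [pvMod2Go, if_neg hcond]
        exact ⟨h01n, hne, by omega, pvCong_refl _ _⟩

-- the dividend string "1" + "0"*(n-1) + "1"
theorem pvNp_chars (m : Nat) : pvChars01 ('1' :: (List.replicate m '0' ++ ['1'])) := by
  intro c hc
  rcases List.mem_cons.mp hc with rfl | hc
  · right; rfl
  · rcases List.mem_append.mp hc with hc | hc
    · left; exact (List.eq_of_mem_replicate hc)
    · right; simpa using hc

theorem pvNp_val (m : Nat) : pvVal ('1' :: (List.replicate m '0' ++ ['1'])) = 2 ^ (m + 1) + 1 := by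
  rw [pvVal_cons, pvVal_append, pvVal_replicate_zero, List.length_append, List.length_replicate]
  have h1 : pvVal ['1'] = 1 := by decide
  have h2 : pvBit '1' = 1 := rfl
  simp [h1, h2]

-- ---------- fixed-width binary rendering ----------
def pvFix : Nat → Nat → List Char
  | 0, _ => []
  | t+1, i => pvFix t (i / 2) ++ [Nat.digitChar (i % 2)]

theorem pvFix_length (t : Nat) : ∀ i, (pvFix t i).length = t := by
  induction t with
  | zero => intro i; rfl
  | succ t ih => intro i; simp [pvFix, ih]

theorem pvFix_chars01 (t : Nat) : ∀ i, pvChars01 (pvFix t i) := by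
  induction t with
  | zero => intro i c hc; simp [pvFix] at hc
  | succ t ih =>
      intro i c hc
      simp only [pvFix] at hc
      rcases List.mem_append.mp hc with hc | hc
      · exact ih _ c hc
      · simp at hc
        rcases Nat.mod_two_eq_zero_or_one i with hm | hm
        · rw [hm] at hc; subst hc; left; decide
        · rw [hm] at hc; subst hc; right; decide

theorem pvVal_pvFix (t : Nat) : ∀ i, i < 2 ^ t → pvVal (pvFix t i) = i := by
  induction t with
  | zero =>
      intro i hi
      have : i = 0 := by simpa using hi
      subst this; rfl
  | succ t ih =>
      intro i hi
      have hi2 : i / 2 < 2 ^ t := by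
        have : (2:Nat) ^ (t+1) = 2 * 2 ^ t := by ring
        omega
      simp only [pvFix]
      rw [pvVal_append, ih _ hi2]
      simp only [List.length_cons, List.length_nil, pow_one]
      rcases Nat.mod_two_eq_zero_or_one i with hm | hm <;> rw [hm]
      · have hv : pvVal [Nat.digitChar 0] = 0 := by decide
        rw [hv]; omega
      · have hv : pvVal [Nat.digitChar 1] = 1 := by decide
        rw [hv]; omega

theorem pvFix_zero_eq (t : Nat) : pvFix t 0 = List.replicate t '0' := by
  induction t with
  | zero => rfl
  | succ t ih =>
      simp only [pvFix, Nat.zero_div, Nat.zero_mod, ih]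
      rw [show Nat.digitChar 0 = '0' by decide, ← List.replicate_succ']

theorem pvFix_cons_zero (t : Nat) : ∀ i, i < 2 ^ t → pvFix (t+1) i = '0' :: pvFix t i := by
  induction t with
  | zero =>
      intro i hi
      have : i = 0 := by simpa using hi
      subst this; rfl
  | succ t ih =>
      intro i hi
      have hi2 : i / 2 < 2 ^ t := by
        have : (2:Nat) ^ (t+1) = 2 * 2 ^ t := by ring
        omega
      show pvFix (t+1) (i / 2) ++ [Nat.digitChar (i % 2)] = '0' :: (pvFix (t+1) i)
      rw [ih _ hi2]
      rfl

theorem pvFix_pad {s : Nat} : ∀ t, s ≤ t → ∀ i, i < 2 ^ s →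
    pvFix t i = List.replicate (t - s) '0' ++ pvFix s i := by
  intro t
  induction t with
  | zero =>
      intro hst i hi
      have : s = 0 := by omega
      subst this
      simp
  | succ t ih =>
      intro hst i hi
      by_cases hcase : s = t + 1
      · subst hcase; simp
      · have hst' : s ≤ t := by omega
        have hit : i < 2 ^ t :=
          lt_of_lt_of_le hi (Nat.pow_le_pow_right (by norm_num) hst')
        rw [pvFix_cons_zero t i hit, ih hst' i hi]
        have : t + 1 - s = (t - s) + 1 := by omega
        rw [this, List.replicate_succ]
        rfl

theorem pvFix_top : ∀ s j, j < 2 ^ s → pvFix (s+1) (2 ^ s + j) = '1' :: pvFix s j := by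
  intro s
  induction s with
  | zero =>
      intro j hj
      have : j = 0 := by simpa using hj
      subst this; rfl
  | succ s ih =>
      intro j hj
      have hpow : (2:Nat) ^ (s+1) = 2 * 2 ^ s := by ring
      have hdiv : (2 ^ (s+1) + j) / 2 = 2 ^ s + j / 2 := by omega
      have hmod : (2 ^ (s+1) + j) % 2 = j % 2 := by omega
      show pvFix (s+1) ((2 ^ (s+1) + j) / 2) ++ [Nat.digitChar ((2 ^ (s+1) + j) % 2)] = _
      rw [hdiv, hmod, ih (j / 2) (by omega)]
      rfl

-- `bin` as a left fold of binary digits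
def pvBitsAux (n : Nat) (acc : List Char) : List Char :=
  if n < 2 then Nat.digitChar n :: acc
  else pvBitsAux (n / 2) (Nat.digitChar (n % 2) :: acc)
termination_by n
decreasing_by exact Nat.div_lt_self (by omega) (by norm_num)

theorem pvToDigitsCore_eq : ∀ f n acc, n < 2 ^ f →
    Nat.toDigitsCore 2 (f + 1) n acc = pvBitsAux n acc := by
  intro f
  induction f with
  | zero =>
      intro n acc hn
      have : n = 0 := by simpa using hn
      subst this
      rw [pvBitsAux]
      simp [Nat.toDigitsCore]
  | succ f ih =>
      intro n acc hn
      rw [pvBitsAux]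
      by_cases h2 : n < 2
      · rw [if_pos h2]
        have hdiv : n / 2 = 0 := by omega
        have hmod : n % 2 = n := by omega
        simp [Nat.toDigitsCore, hdiv, hmod]
      · rw [if_neg h2]
        have hdiv : ¬ (n / 2 = 0) := by omega
        have hlt : n / 2 < 2 ^ f := by
          have : (2:Nat) ^ (f+1) = 2 * 2 ^ f := by ring
          omega
        simp only [Nat.toDigitsCore, hdiv, if_false]
        exact ih (n / 2) (Nat.digitChar (n % 2) :: acc) hlt

theorem pvToDigits_eq (n : Nat) : Nat.toDigits 2 n = pvBitsAux n [] := by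
  show Nat.toDigitsCore 2 (n + 1) n [] = _
  exact pvToDigitsCore_eq n n [] Nat.lt_two_pow_self

theorem pvBitsAux_top : ∀ T j acc, j < 2 ^ T →
    pvBitsAux (2 ^ T + j) acc = '1' :: (pvFix T j ++ acc) := by
  intro T
  induction T with
  | zero =>
      intro j acc hj
      have : j = 0 := by simpa using hj
      subst this
      rw [pvBitsAux]
      simp [pvFix, show Nat.digitChar 1 = '1' by decide]
  | succ T ih =>
      intro j acc hj
      have hpow : (2:Nat) ^ (T+1) = 2 * 2 ^ T := by ring
      have hge : ¬ (2 ^ (T+1) + j < 2) := by omega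
      rw [pvBitsAux, if_neg hge]
      have hdiv : (2 ^ (T+1) + j) / 2 = 2 ^ T + j / 2 := by omega
      have hmod : (2 ^ (T+1) + j) % 2 = j % 2 := by omega
      rw [hdiv, hmod, ih (j / 2) _ (by omega)]
      show '1' :: (pvFix T (j / 2) ++ (Nat.digitChar (j % 2) :: acc)) = _
      simp [pvFix]

theorem pvBitsAux_zero : pvBitsAux 0 [] = ['0'] := by
  rw [pvBitsAux]; rfl

-- zfill(bin(j)[2:], w) = the (max w 1)-wide binary rendering of j
theorem pvZfill_eq (w : Int) : ∀ j : Nat, j < 2 ^ w.toNat →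
    PySem.Chars.zfill (pvBitsAux j []) w = pvFix (max w.toNat 1) j := by
  intro j hj
  rcases Nat.eq_zero_or_pos j with rfl | hjpos
  · rw [pvBitsAux_zero]
    by_cases hw : w ≤ 1
    · have h1 : PySem.Chars.zfill ['0'] w = ['0'] := by
        unfold PySem.Chars.zfill
        rw [if_pos (by simpa using hw)]
      have h2 : max w.toNat 1 = 1 := by omega
      rw [h1, h2]
      rfl
    · push_neg at hw
      have h2 : max w.toNat 1 = w.toNat := by omega
      have h1 : PySem.Chars.zfill ['0'] w = List.replicate (w.toNat - 1) '0' ++ ['0'] := by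
        unfold PySem.Chars.zfill
        rw [if_neg (by simp; omega)]
        simp
      have hrep : List.replicate w.toNat '0' = List.replicate (w.toNat - 1) '0' ++ ['0'] := by
        conv_lhs => rw [show w.toNat = (w.toNat - 1) + 1 by omega]
        rw [List.replicate_succ']
      rw [h1, h2, pvFix_zero_eq, hrep]
  · -- j ≥ 1: split off the top bit
    have hsz1 : 0 < j.size := Nat.size_pos.mpr hjpos
    set s := j.size - 1 with hsdef
    have hs2 : j < 2 ^ (s + 1) := by
      have := Nat.lt_size_self j
      rwa [show s + 1 = j.size by omega]
    have hs1 : 2 ^ s ≤ j := Nat.lt_size.mp (by omega)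
    set j' := j - 2 ^ s with hj'def
    have hj' : j' < 2 ^ s := by
      have hpow : (2:Nat) ^ (s+1) = 2 * 2 ^ s := by ring
      omega
    have hjeq : j = 2 ^ s + j' := by omega
    have hbits : pvBitsAux j [] = '1' :: pvFix s j' := by
      conv_lhs => rw [hjeq]
      rw [pvBitsAux_top s j' [] hj']
      simp
    rw [hbits]
    have hlen : ('1' :: pvFix s j').length = s + 1 := by simp [pvFix_length]
    have hsT : s + 1 ≤ w.toNat := by
      have hlt : 2 ^ s < 2 ^ w.toNat := lt_of_le_of_lt hs1 hj
      have := (Nat.pow_lt_pow_iff_right (a := 2) (by norm_num)).mp hlt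
      omega
    have hwpos : 0 < w := by
      by_contra hw0
      push_neg at hw0
      have : w.toNat = 0 := Int.toNat_of_nonpos hw0
      omega
    have hmaxw : max w.toNat 1 = w.toNat := by omega
    rw [hmaxw]
    by_cases hcase : w ≤ ((('1' :: pvFix s j').length : Int))
    · have hle : w.toNat ≤ s + 1 := by
        rw [hlen] at hcase
        omega
      have hTeq : w.toNat = s + 1 := by omega
      have h1 : PySem.Chars.zfill ('1' :: pvFix s j') w = '1' :: pvFix s j' := by
        unfold PySem.Chars.zfill
        rw [if_pos hcase]
      rw [h1, hTeq, hjeq, pvFix_top s j' hj']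
    · push_neg at hcase
      have hgt : s + 1 < w.toNat := by
        rw [hlen] at hcase
        omega
      have h1 : PySem.Chars.zfill ('1' :: pvFix s j') w
          = List.replicate (w.toNat - (s + 1)) '0' ++ ('1' :: pvFix s j') := by
        unfold PySem.Chars.zfill
        rw [if_neg (by omega)]
        have hsign : ¬ ('1' = '+' ∨ '1' = '-') := by decide
        simp only [if_neg hsign]
        rw [hlen]
      rw [h1]
      rw [pvFix_pad w.toNat (by omega) j hs2]
      rw [show pvFix (s+1) j = '1' :: pvFix s j' by rw [hjeq]; exact pvFix_top s j' hj']

-- ---------- shapes of the two ports ----------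
theorem pvRange_cast (M : Nat) :
    PySem.List.pyRange 0 ((M : Int)) 1 = (List.range M).map (fun j : Nat => (j : Int)) := by
  rw [PySem.List.pyRange_one]
  rw [show ((M : Int) - 0).toNat = M by omega]
  apply List.map_congr_left
  intro a _
  omega

theorem pvToBinChars_nat (g : Nat) :
    PySem.Int.toBinChars ((g : Nat) : Int) = Nat.toDigits 2 g := by
  unfold PySem.Int.toBinChars
  rw [if_neg (by omega)]
  simp

theorem pvA_shape (n k : Int) :
    find_gen_poly n k =
      ((List.range (2 ^ (n - k).toNat)).filter (fun j =>
          decide (pvDigitsVal (mod_2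
            (String.ofList ('1' :: (List.replicate (n - 1).toNat '0' ++ ['1'])))
            (String.ofList ('1' :: PySem.Chars.zfill
              (PySem.List.slice (PySem.Int.toBinChars0b ((j : Nat) : Int)) (some 2) none)
              (n - k)))).toList = 0))).map
        (fun j => String.ofList ('1' :: PySem.Chars.zfill
          (PySem.List.slice (PySem.Int.toBinChars0b ((j : Nat) : Int)) (some 2) none) (n - k))) := by
  have hcast : ((2:Int) ^ (n - k).toNat) = (((2 ^ (n - k).toNat : Nat)) : Int) := by push_cast; ring
  simp only [find_gen_poly, all_poly]
  rw [PySem.List.foldl_append_singleton_eq_map, List.nil_append, hcast, pvRange_cast,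
    List.map_map]
  rw [PySem.List.foldl_append_ite_eq_filter
    (p := fun s => pvDigitsVal (mod_2
      (String.ofList ('1' :: (List.replicate (n - 1).toNat '0' ++ ['1']))) s).toList = 0)]
  rw [List.nil_append, List.filter_map]
  simp only [Function.comp_def]

theorem pvB_shape (n k : Int) :
    find_gen_poly_alt n k =
      ((List.range (2 ^ (n - k).toNat)).filter (fun j =>
          decide (pvPowLoop (2 ^ (n - k).toNat ||| j) (2 ^ (n - k).toNat)
            (pvRed (2 ^ (n - k).toNat ||| j) (2 ^ (n - k).toNat) 1)
            (pvRed (2 ^ (n - k).toNat ||| j) (2 ^ (n - k).toNat) 2) n.toNat = 1))).map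
        (fun j => String.ofList (PySem.Int.toBinChars ((2 ^ (n - k).toNat ||| j : Nat) : Int))) := by
  simp only [find_gen_poly_alt]
  rw [PySem.List.foldl_append_ite
    (p := fun i : Int => pvPowLoop (2 ^ (n - k).toNat ||| i.toNat) (2 ^ (n - k).toNat)
      (pvRed (2 ^ (n - k).toNat ||| i.toNat) (2 ^ (n - k).toNat) 1)
      (pvRed (2 ^ (n - k).toNat ||| i.toNat) (2 ^ (n - k).toNat) 2) n.toNat = 1)
    (f := fun i : Int =>
      String.ofList (PySem.Int.toBinChars ((2 ^ (n - k).toNat ||| i.toNat : Nat) : Int)))]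
  rw [pvRange_cast, List.nil_append, List.filter_map, List.map_map]
  simp only [Function.comp_def, Int.toNat_natCast]
  apply congrArg
  apply List.filter_congr
  intro a _
  exact decide_eq_decide.mpr Iff.rfl

-- per-candidate characterisation of A's test
theorem pvA_test_iff (n k : Int) (j : Nat) (hj : j < 2 ^ (max (n - k).toNat 1)) :
    (pvDigitsVal (mod_2 (String.ofList ('1' :: (List.replicate (n - 1).toNat '0' ++ ['1'])))
        (String.ofList ('1' :: pvFix (max (n - k).toNat 1) j))).toList = 0)
      ↔ pvCong (2 ^ (max (n - k).toNat 1) + j) (2 ^ ((n - 1).toNat + 1) + 1) 0 := by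
  set T' := max (n - k).toNat 1 with hT'
  have hT'1 : 1 ≤ T' := by omega
  set m := (n - 1).toNat with hm
  set np := '1' :: (List.replicate m '0' ++ ['1']) with hnp
  set dv := '1' :: pvFix T' j with hdv
  have hdv01 : pvChars01 dv := by
    intro c hc
    rcases List.mem_cons.mp hc with rfl | hc
    · right; rfl
    · exact pvFix_chars01 T' j c hc
  have hdvhead : dv.head? = some '1' := rfl
  have hdvlen : dv.length = T' + 1 := by simp [hdv, pvFix_length]
  have hdvL : 2 ≤ dv.length := by omega
  have hdvval : pvVal dv = 2 ^ T' + j := by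
    rw [hdv, pvVal_cons, pvFix_length, pvVal_pvFix T' j hj]
    simp [pvBit]
  have hnp01 : pvChars01 np := pvNp_chars m
  have hnphead : np.head? = some '1' := rfl
  have hnpne : np ≠ [] := by simp [hnp]
  have hnpval : pvVal np = 2 ^ (m + 1) + 1 := pvNp_val m
  have hheadcond : dv.length ≤ np.length → np.head? = some '1' := fun _ => hnphead
  have hspec := pvMod2Go_spec hdv01 hdvhead hdvL (np.length + 1) np (by omega) hnp01 hnpne hheadcond
  obtain ⟨hr01, hrne, hrlen, hrcong⟩ := hspec
  set r := pvMod2Go dv (np.length + 1) np with hr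
  have hmod : (mod_2 (String.ofList np) (String.ofList dv)).toList = r := by
    unfold mod_2
    rw [String.toList_ofList, String.toList_ofList, String.toList_ofList]
  rw [hmod]
  have hG1 : 2 ^ T' ≤ pvVal dv := by rw [hdvval]; omega
  have hG2 : pvVal dv < 2 ^ (T' + 1) := by
    rw [hdvval]
    have : (2:Nat) ^ (T' + 1) = 2 * 2 ^ T' := by ring
    omega
  have hrvlt : pvVal r < 2 ^ T' := by
    have h1 : pvVal r < 2 ^ r.length := pvVal_lt r
    have h2 : (2:Nat) ^ r.length ≤ 2 ^ T' :=
      Nat.pow_le_pow_right (by norm_num) (by omega)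
    omega
  rw [pvDigitsVal_zero_iff hr01]
  rw [← hdvval]
  constructor
  · intro h0
    rw [h0] at hrcong
    rw [hnpval] at hrcong
    exact hrcong
  · intro hc0
    rw [hnpval] at hrcong
    have h1 : pvCong (pvVal dv) 0 (pvVal r) :=
      pvCong_trans (pvCong_symm hc0) hrcong
    have h2 : (0:Nat) < 2 ^ T' := by positivity
    exact (pvCong_unique hG1 hG2 h2 hrvlt h1).symm

-- per-candidate characterisation of B's test
theorem pvB_test_iff (T E : Nat) (hT : 1 ≤ T) (hE : 1 ≤ E) (j : Nat) (hj : j < 2 ^ T) :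
    (pvPowLoop (2 ^ T + j) (2 ^ T) (pvRed (2 ^ T + j) (2 ^ T) 1) (pvRed (2 ^ T + j) (2 ^ T) 2) E = 1)
      ↔ pvCong (2 ^ T + j) (2 ^ E + 1) 0 := by
  set G := 2 ^ T + j with hG
  have hG1 : 2 ^ T ≤ G := by omega
  have hG2 : G < 2 ^ (T + 1) := by
    have : (2:Nat) ^ (T + 1) = 2 * 2 ^ T := by ring
    omega
  have h2T : (2:Nat) ≤ 2 ^ T := by
    calc (2:Nat) = 2 ^ 1 := by ring
      _ ≤ 2 ^ T := Nat.pow_le_pow_right (by norm_num) hT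
  have hred1 : pvRed G (2 ^ T) 1 = 1 := by
    unfold pvRed
    rw [if_neg (by omega)]
  have hred2 := pvRed_spec hG1 hG2 (v := 2) (by
    have : (2:Nat) ^ (T + 1) = 2 * 2 ^ T := by ring
    omega)
  have hspec := pvPowLoop_spec hG1 hG2 E (pvRed G (2 ^ T) 1) (pvRed G (2 ^ T) 2)
    (by rw [hred1]; omega) hred2.1
  set ρ := pvPowLoop G (2 ^ T) (pvRed G (2 ^ T) 1) (pvRed G (2 ^ T) 2) E with hρ
  have hcong1 : pvCong G (pvClpow (pvRed G (2 ^ T) 2) E) ρ := by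
    have h := hspec.2
    rwa [hred1, pvCl_one_left] at h
  have hcong2 : pvCong G (2 ^ E) ρ := by
    have h1 : pvCong G (pvClpow 2 E) (pvClpow (pvRed G (2 ^ T) 2) E) :=
      pvCong_clpow E hred2.2
    have h := pvCong_trans h1 hcong1
    rwa [pvClpow_two] at h
  have hxe : 2 ^ E ^^^ 1 = 2 ^ E + 1 := by
    have h := pvDisjXor 1 1 E (by
      calc (1:Nat) < 2 := by omega
        _ ≤ 2 ^ E := by
          calc (2:Nat) = 2 ^ 1 := by ring
            _ ≤ 2 ^ E := Nat.pow_le_pow_right (by norm_num) hE)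
    simpa using h
  constructor
  · intro h1
    rw [h1] at hcong2
    have h2 : pvCong G (2 ^ E ^^^ 1) (1 ^^^ 1) := (pvCong_xor_iff 1).mpr hcong2
    rw [hxe] at h2
    simpa using h2
  · intro hc
    have h2 : pvCong G (2 ^ E ^^^ 1) (1 ^^^ 1) := by
      rw [hxe]
      simpa using hc
    have h3 : pvCong G (2 ^ E) 1 := (pvCong_xor_iff 1).mp h2
    have h4 : pvCong G 1 ρ := pvCong_trans (pvCong_symm h3) hcong2
    have h5 : (1:Nat) < 2 ^ T := by omega
    exact (pvCong_unique hG1 hG2 h5 hspec.1 h4).symm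

-- bin(i)[2:].zfill(w) rewritten as the fixed-width rendering
theorem pvCand_eq (w : Int) (j : Nat) (hj : j < 2 ^ w.toNat) :
    ('1' :: PySem.Chars.zfill
        (PySem.List.slice (PySem.Int.toBinChars0b ((j : Nat) : Int)) (some 2) none) w)
      = '1' :: pvFix (max w.toNat 1) j := by
  congr 1
  have h0b : PySem.Int.toBinChars0b ((j : Nat) : Int) = '0' :: 'b' :: Nat.toDigits 2 j := by
    unfold PySem.Int.toBinChars0b
    rw [if_neg (by omega)]
    simp
  rw [h0b, PySem.List.slice_from _ (by norm_num)]
  show PySem.Chars.zfill (List.drop 2 ('0' :: 'b' :: Nat.toDigits 2 j)) w = _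
  rw [List.drop_succ_cons, List.drop_succ_cons, List.drop_zero]
  rw [pvToDigits_eq]
  exact pvZfill_eq w j hj

theorem pvPowMaxEven (x : Nat) : 2 ^ max x 1 % 2 = 0 := by
  have h1 : 1 ≤ max x 1 := le_max_right _ _
  rw [show max x 1 = (max x 1 - 1) + 1 by omega, pow_succ]
  omega

theorem pvPowSuccOdd (m : Nat) : (2 ^ (m + 1) + 1) % 2 = 1 := by
  rw [pow_succ]; omega

-- A's test is impossible when the divisor is even (the degree-0 candidate "10" and g = 2^T)
theorem pvNoDivEven (G D : Nat) (hG : G % 2 = 0) (hD : D % 2 = 1) : ¬ pvCong G D 0 := by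
  rintro ⟨q, hq⟩
  have hcl : pvCl q G = D := by
    calc pvCl q G = D ^^^ (D ^^^ pvCl q G) := by
          rw [← Nat.xor_assoc, Nat.xor_self, Nat.zero_xor]
      _ = D ^^^ 0 := by rw [← hq]
      _ = D := by simp
  have h2 : pvCl q G % 2 = 0 := by
    have hGdecomp : G = 2 * (G / 2) := by omega
    rw [hGdecomp, pvCl_two_mul_right]
    omega
  omega

-- ===== VERDICT (by name: the statement is the Claim_ definition above) =====
theorem find_gen_poly_spec : Claim_unchanged_find_gen_poly := by
  unfold Claim_unchanged_find_gen_poly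
  intro n k _ hpre
  unfold Spec_find_gen_poly
  intro hD
  unfold Pre_find_gen_poly at hpre
  unfold D_find_gen_poly at hD
  push_neg at hD
  rw [pvA_shape, pvB_shape]
  by_cases hT0 : (n - k).toNat = 0
  · -- k = n: A tests only the degree-1 candidate "10" (it fails), B tests only g = 1 (it fails)
    rw [hT0]
    simp only [pow_zero, List.range_one]
    have hA0 : ¬ (pvDigitsVal (mod_2
        (String.ofList ('1' :: (List.replicate (n - 1).toNat '0' ++ ['1'])))
        (String.ofList ('1' :: PySem.Chars.zfill
          (PySem.List.slice (PySem.Int.toBinChars0b ((0 : Nat) : Int)) (some 2) none)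
          (n - k)))).toList = 0) := by
      rw [pvCand_eq (n - k) 0 (by positivity)]
      rw [pvA_test_iff n k 0 (by positivity)]
      rw [show (2 : Nat) ^ max (n - k).toNat 1 + 0 = 2 ^ max (n - k).toNat 1 by omega]
      exact pvNoDivEven _ _ (pvPowMaxEven _) (pvPowSuccOdd _)
    have hB0 : ¬ (pvPowLoop ((1 : Nat) ||| 0) 1 (pvRed ((1 : Nat) ||| 0) 1 1)
        (pvRed ((1 : Nat) ||| 0) 1 2) n.toNat = 1) := by
      have h1 : ((1 : Nat) ||| 0) = 1 := rfl
      rw [h1]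
      have h2 : pvRed 1 1 1 = 0 := by decide
      rw [h2]
      show pvPowLoopGo 1 1 n.toNat 0 (pvRed 1 1 2) n.toNat ≠ 1
      rw [pvPowLoopGo_zero]
      omega
    have hAnil : ([0] : List Nat).filter (fun j =>
        decide (pvDigitsVal (mod_2
          (String.ofList ('1' :: (List.replicate (n - 1).toNat '0' ++ ['1'])))
          (String.ofList ('1' :: PySem.Chars.zfill
            (PySem.List.slice (PySem.Int.toBinChars0b ((j : Nat) : Int)) (some 2) none)
            (n - k)))).toList = 0)) = [] := by
      apply List.filter_eq_nil_iff.mpr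
      intro a ha
      have : a = 0 := by simpa using ha
      subst this
      simpa using hA0
    have hBnil : ([0] : List Nat).filter (fun j =>
        decide (pvPowLoop ((1 : Nat) ||| j) 1 (pvRed ((1 : Nat) ||| j) 1 1)
          (pvRed ((1 : Nat) ||| j) 1 2) n.toNat = 1)) = [] := by
      apply List.filter_eq_nil_iff.mpr
      intro a ha
      have : a = 0 := by simpa using ha
      subst this
      simpa using hB0
    rw [hAnil, hBnil]
    rfl
  · have hT1 : 1 ≤ (n - k).toNat := by omega
    have hkn : k < n := by
      by_contra hc
      push_neg at hc
      have : n - k ≤ 0 := by omega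
      have : (n - k).toNat = 0 := Int.toNat_of_nonpos this
      omega
    have hn1 : 1 ≤ n := by
      by_contra hc
      push_neg at hc
      exact absurd (hD (by omega)) (by omega)
    have hE1 : 1 ≤ n.toNat := by omega
    have hmax : max (n - k).toNat 1 = (n - k).toNat := by omega
    have hmE : (n - 1).toNat + 1 = n.toNat := by omega
    have hfilter :
        (List.range (2 ^ (n - k).toNat)).filter (fun j =>
          decide (pvDigitsVal (mod_2
            (String.ofList ('1' :: (List.replicate (n - 1).toNat '0' ++ ['1'])))
            (String.ofList ('1' :: PySem.Chars.zfill
              (PySem.List.slice (PySem.Int.toBinChars0b ((j : Nat) : Int)) (some 2) none)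
              (n - k)))).toList = 0))
        = (List.range (2 ^ (n - k).toNat)).filter (fun j =>
          decide (pvPowLoop (2 ^ (n - k).toNat ||| j) (2 ^ (n - k).toNat)
            (pvRed (2 ^ (n - k).toNat ||| j) (2 ^ (n - k).toNat) 1)
            (pvRed (2 ^ (n - k).toNat ||| j) (2 ^ (n - k).toNat) 2) n.toNat = 1)) := by
      apply List.filter_congr
      intro j hjmem
      have hj : j < 2 ^ (n - k).toNat := List.mem_range.mp hjmem
      rw [pvCand_eq (n - k) j hj, hmax, pvOrAdd hj]
      apply decide_eq_decide.mpr
      have h1 := pvA_test_iff n k j (by rw [hmax]; exact hj)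
      rw [hmax, hmE] at h1
      have h2 := pvB_test_iff (n - k).toNat n.toNat hT1 hE1 j hj
      exact h1.trans h2.symm
    rw [hfilter]
    apply List.map_congr_left
    intro j hjf
    have hj : j < 2 ^ (n - k).toNat := List.mem_range.mp (List.mem_of_mem_filter hjf)
    have hcand := pvCand_eq (n - k) j hj
    rw [hmax] at hcand
    rw [hcand, pvOrAdd hj, pvToBinChars_nat, pvToDigits_eq,
      pvBitsAux_top (n - k).toNat j [] hj]
    simp

theorem find_gen_poly_changed : Claim_changed_find_gen_poly := by
  unfold Claim_changed_find_gen_poly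
  exact ⟨by decide, by decide, by decide, by decide, by decide, by decide⟩

theorem find_gen_poly_tight : Claim_exact_find_gen_poly := by
  unfold Claim_exact_find_gen_poly
  intro n k _ hpre hD heq
  unfold Pre_find_gen_poly at hpre
  unfold D_find_gen_poly at hD
  obtain ⟨hn0, hkn⟩ := hD
  have hT1 : 1 ≤ (n - k).toNat := by
    have : (1:Int) ≤ n - k := by omega
    omega
  rw [pvA_shape, pvB_shape] at heq
  have hlen := congrArg List.length heq
  rw [List.length_map, List.length_map] at hlen
  have hE0 : n.toNat = 0 := by
    have : n ≤ 0 := hn0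
    exact Int.toNat_of_nonpos this
  have hBall : ∀ j ∈ List.range (2 ^ (n - k).toNat),
      (fun j => decide (pvPowLoop (2 ^ (n - k).toNat ||| j) (2 ^ (n - k).toNat)
        (pvRed (2 ^ (n - k).toNat ||| j) (2 ^ (n - k).toNat) 1)
        (pvRed (2 ^ (n - k).toNat ||| j) (2 ^ (n - k).toNat) 2) n.toNat = 1)) j = true := by
    intro j hjmem
    have h2T : (2:Nat) ≤ 2 ^ (n - k).toNat := by
      calc (2:Nat) = 2 ^ 1 := by ring
        _ ≤ 2 ^ (n - k).toNat := Nat.pow_le_pow_right (by norm_num) hT1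
    have hred1 : pvRed (2 ^ (n - k).toNat ||| j) (2 ^ (n - k).toNat) 1 = 1 := by
      unfold pvRed
      rw [if_neg (by omega)]
    show decide (pvPowLoop (2 ^ (n - k).toNat ||| j) (2 ^ (n - k).toNat)
      (pvRed (2 ^ (n - k).toNat ||| j) (2 ^ (n - k).toNat) 1)
      (pvRed (2 ^ (n - k).toNat ||| j) (2 ^ (n - k).toNat) 2) n.toNat = 1) = true
    rw [hE0]
    rw [show pvPowLoop (2 ^ (n - k).toNat ||| j) (2 ^ (n - k).toNat)
      (pvRed (2 ^ (n - k).toNat ||| j) (2 ^ (n - k).toNat) 1)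
      (pvRed (2 ^ (n - k).toNat ||| j) (2 ^ (n - k).toNat) 2) 0
      = pvRed (2 ^ (n - k).toNat ||| j) (2 ^ (n - k).toNat) 1 from rfl]
    rw [hred1]
    decide
  rw [List.filter_eq_self.mpr hBall, List.length_range] at hlen
  have hm0 : (n - 1).toNat = 0 := Int.toNat_of_nonpos (by omega)
  have hA0mem : (0:Nat) ∈ List.range (2 ^ (n - k).toNat) := List.mem_range.mpr (by positivity)
  have hA0 : ¬ (pvDigitsVal (mod_2
      (String.ofList ('1' :: (List.replicate (n - 1).toNat '0' ++ ['1'])))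
      (String.ofList ('1' :: PySem.Chars.zfill
        (PySem.List.slice (PySem.Int.toBinChars0b ((0 : Nat) : Int)) (some 2) none)
        (n - k)))).toList = 0) := by
    rw [pvCand_eq (n - k) 0 (by positivity)]
    rw [pvA_test_iff n k 0 (by positivity)]
    rw [hm0]
    rw [show (2 : Nat) ^ max (n - k).toNat 1 + 0 = 2 ^ max (n - k).toNat 1 by omega]
    exact pvNoDivEven _ _ (pvPowMaxEven _) (pvPowSuccOdd _)
  have hAlt : ((List.range (2 ^ (n - k).toNat)).filter (fun j =>
      decide (pvDigitsVal (mod_2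
        (String.ofList ('1' :: (List.replicate (n - 1).toNat '0' ++ ['1'])))
        (String.ofList ('1' :: PySem.Chars.zfill
          (PySem.List.slice (PySem.Int.toBinChars0b ((j : Nat) : Int)) (some 2) none)
          (n - k)))).toList = 0))).length
      < (List.range (2 ^ (n - k).toNat)).length := by
    apply List.length_filter_lt_length_iff_exists.mpr
    exact ⟨0, hA0mem, by simpa using hA0⟩
  rw [List.length_range] at hAlt
  omega
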